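-- pv_equiv track=rewrite | github.com/abdul-rasool/EDS-Effective-DNA-Storage-System | EDS.py | decode_index
-- ===== SOURCE A (Python) =====
-- def decode_index(input_str, index_length):
--     ter_index = ''
--     pre = 'A'
--     base_rule = {'A': ['C', 'G', 'T'], 'T': ['A', 'C', 'G'], 'C': ['G', 'T', 'A'], 'G': ['T', 'A', 'C']}
--     pos = 0
--     while pos < index_length:
--         ter_index += str(base_rule[pre].index(input_str[pos]))
--         pre = input_str[pos]
--         pos += 1
--     ter_list = list(map(int,list(ter_index)))
--     index = 0
--     for i in range(index_length):
--         index += 3 ** (index_length - i - 1) * ter_list[i]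
--     return index
-- ===== SOURCE B (Python) =====
-- def decode_index(input_str, index_length):
--     base_rule = {'A': ['C', 'G', 'T'], 'T': ['A', 'C', 'G'], 'C': ['G', 'T', 'A'], 'G': ['T', 'A', 'C']}
--     index = 0
--     pre = 'A'
--     for pos in range(index_length):
--         c = input_str[pos]
--         index = index * 3 + base_rule[pre].index(c)
--         pre = c
--     return index
-- ===== Notes on version B (the rewrite author's own statement) =====
-- stated objective: simpler
-- what changed: Single-pass Horner accumulation (index = index*3 + digit) replaces A's two passes with an intermediate digit string, list(map(int,...)) conversion and explicit 3**k powers.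
import Mathlib
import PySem

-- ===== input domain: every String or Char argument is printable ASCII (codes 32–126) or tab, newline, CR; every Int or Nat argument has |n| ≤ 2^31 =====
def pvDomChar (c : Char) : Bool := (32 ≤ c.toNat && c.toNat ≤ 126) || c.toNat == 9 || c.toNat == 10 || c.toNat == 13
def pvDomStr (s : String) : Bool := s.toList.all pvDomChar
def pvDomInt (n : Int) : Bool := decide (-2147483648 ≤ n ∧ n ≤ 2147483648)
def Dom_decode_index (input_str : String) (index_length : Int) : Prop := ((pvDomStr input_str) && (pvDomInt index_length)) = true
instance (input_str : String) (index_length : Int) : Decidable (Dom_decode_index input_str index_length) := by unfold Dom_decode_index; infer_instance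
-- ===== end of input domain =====

-- B replaces A's two passes (digit string, then a 3**k power sum) by a single Horner pass; return value only, neither mutates.

-- ===== PORT A =====
-- base_rule (shared data: both Pythons define the identical dict literal)
def pvBaseRule : PySem.Dict Char (List Char) :=
  PySem.Dict.ofList [('A', ['C','G','T']), ('T', ['A','C','G']), ('C', ['G','T','A']), ('G', ['T','A','C'])]

-- base_rule[pre].index(c); none = KeyError (pre not a key) or ValueError (c not in the row)
def pvDigit? (pre c : Char) : Option Nat :=
  (PySem.Dict.get? pvBaseRule pre).bind (fun row => PySem.List.index? row c)

-- the while loop of A: builds the digit string ter_index; none = the Python raises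
def pvALoop (chars : List Char) (index_length : Int) (pos : Int) (pre : Char) (ter : String) : Option String :=
  if pos < index_length then
    match PySem.List.pyGet? chars pos with
    | none => none
    | some c =>
      match pvDigit? pre c with
      | none => none
      | some d => pvALoop chars index_length (pos + 1) c (ter ++ PySem.Int.toStr (d : Int))
  else some ter
termination_by (index_length - pos).toNat
decreasing_by simp at *; omega

def decode_index (input_str : String) (index_length : Int) : Int :=
  match pvALoop input_str.toList index_length 0 'A' "" with
  | none => 0  -- unreachable under Pre_ (the Python raises here)
  | some ter =>
    -- ter_list = list(map(int, list(ter_index))): exact, since ter_index holds only digit chars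
    let ter_list : List Int := ter.toList.map (fun ch => (ch.toNat : Int) - 48)
    -- for i in range(index_length): index += 3 ** (index_length - i - 1) * ter_list[i]
    -- (the exponent is ≥ 0 for every i in the range, so .toNat is exact; ter_list[i] is always
    --  in range when the while loop returned, so the pyGetD default is never used)
    (PySem.List.pyRange 0 index_length 1).foldl
      (fun index i => index + 3 ^ (index_length - i - 1).toNat * PySem.List.pyGetD ter_list i 0) 0

-- ===== PORT B =====
-- the single for-loop of B over range(index_length), Horner state (index, pre); none = the Python raises
def pvBLoop (chars : List Char) (r : List Int) (index : Int) (pre : Char) : Option Int :=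
  match r with
  | [] => some index
  | pos :: rest =>
    match PySem.List.pyGet? chars pos with
    | none => none
    | some c =>
      match pvDigit? pre c with
      | none => none
      | some d => pvBLoop chars rest (index * 3 + (d : Int)) c

def decode_index_alt (input_str : String) (index_length : Int) : Int :=
  (pvBLoop input_str.toList (PySem.List.pyRange 0 index_length 1) 0 'A').getD 0  -- default unreachable under Pre_

-- ===== PRECONDITION & SPEC =====
-- Pre_ = exactly the inputs where A returns normally: the first index_length characters exist,
-- are all in 'ACGT', and each differs from its predecessor (with 'A' before the first);
-- otherwise A raises IndexError/KeyError/ValueError.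
def Pre_decode_index (input_str : String) (index_length : Int) : Prop :=
  index_length ≤ (input_str.toList.length : Int) ∧
  ((input_str.toList.take index_length.toNat).all
    (fun c => c == 'A' || c == 'C' || c == 'G' || c == 'T')) = true ∧
  List.IsChain (· ≠ ·) ('A' :: input_str.toList.take index_length.toNat)
instance (input_str : String) (index_length : Int) : Decidable (Pre_decode_index input_str index_length) := by
  unfold Pre_decode_index; infer_instance

def pvWitness_decode_index : String × Int := ("CT", 2)

def Spec_decode_index (input_str : String) (index_length : Int) (out : Int) : Prop := out = decode_index_alt input_str index_length
instance (input_str : String) (index_length : Int) (out : Int) : Decidable (Spec_decode_index input_str index_length out) := by unfold Spec_decode_index; infer_instance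

-- ===== CLAIM (what is proved, stated in full; the proofs are below) =====
def Claim_equal_decode_index : Prop := ∀ (input_str : String) (index_length : Int), Dom_decode_index input_str index_length → Pre_decode_index input_str index_length → Spec_decode_index input_str index_length (decode_index input_str index_length)

-- ===== LEMMAS AND PROOFS =====

-- the digit char produced for digit d (A's str(d))
def pvDChar (d : Int) : Char := Char.ofNat (48 + d.toNat)

-- on the four keys, base_rule[pre].index(c) succeeds with a digit < 3 whenever c is a key ≠ pre
theorem pvDigit?_good_bool :
    ((['A','C','G','T'] : List Char).all fun pre => (['A','C','G','T'] : List Char).all fun c =>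
      (pre == c) || ((pvDigit? pre c).isSome && decide ((pvDigit? pre c).getD 3 < 3))) = true := by
  decide

theorem pvDigit?_good :
    ∀ pre ∈ (['A','C','G','T'] : List Char), ∀ c ∈ (['A','C','G','T'] : List Char), pre ≠ c →
      (pvDigit? pre c).isSome = true ∧ (pvDigit? pre c).getD 3 < 3 := by
  have h := pvDigit?_good_bool
  simp only [List.all_eq_true, Bool.or_eq_true, Bool.and_eq_true, beq_iff_eq,
    decide_eq_true_eq] at h
  intro pre hpre c hc hne
  rcases h pre hpre c hc with h1 | h2
  · exact absurd h1 hne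
  · exact h2

theorem pvToStr (d : Nat) (h : d < 3) :
    (PySem.Int.toStr (d : Int)).toList = [pvDChar (d : Int)] := by
  interval_cases d <;> decide

theorem pvDChar_val (d : Int) (h0 : 0 ≤ d) (h3 : d < 3) : ((pvDChar d).toNat : Int) - 48 = d := by
  interval_cases d <;> decide

-- Horner fold with a seed accumulator
theorem pvHorner (l : List Int) : ∀ a : Int,
    l.foldl (fun x d => x * 3 + d) a = a * 3 ^ l.length + l.foldl (fun x d => x * 3 + d) 0 := by
  induction l with
  | nil => intro a; simp
  | cons d l ih =>
    intro a
    simp only [List.foldl_cons, List.length_cons]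
    rw [ih (a * 3 + d), ih (0 * 3 + d)]
    ring

-- A's second pass (power sum over range) equals the Horner fold
theorem pvPowSum (ds : List Int) : ∀ (m k : Nat) (acc : Int), ds.length - k = m → k ≤ ds.length →
    (PySem.List.pyRange (k : Int) (ds.length : Int) 1).foldl
        (fun a i => a + 3 ^ (((ds.length : Int)) - i - 1).toNat * PySem.List.pyGetD ds i 0) acc
      = acc + (ds.drop k).foldl (fun a d => a * 3 + d) 0 := by
  intro m
  induction m with
  | zero =>
    intro k acc hm hk
    have hkl : k = ds.length := by omega
    subst hkl
    rw [PySem.List.pyRange_one_eq_nil (by omega)]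
    simp
  | succ m ih =>
    intro k acc hm hk
    have hklt : k < ds.length := by omega
    rw [PySem.List.pyRange_one_cons (by exact_mod_cast hklt)]
    simp only [List.foldl_cons]
    have hcast : ((k : Int) + 1) = ((k + 1 : Nat) : Int) := by push_cast; ring
    rw [hcast, ih (k + 1) _ (by omega) (by omega)]
    have hdrop : ds.drop k = ds[k] :: ds.drop (k + 1) := List.drop_eq_getElem_cons hklt
    rw [hdrop]
    simp only [List.foldl_cons]
    rw [pvHorner (ds.drop (k + 1)) (0 * 3 + ds[k]), PySem.List.pyGetD_natCast,
      List.getD_eq_getElem?_getD, List.getElem?_eq_getElem hklt]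
    simp only [Option.getD_some]
    have hexp : (((ds.length : Int)) - (k : Int) - 1).toNat = (ds.drop (k + 1)).length := by
      simp [List.length_drop]; omega
    rw [hexp]
    ring

-- main invariant: along a valid window w of the input, A's while loop produces the digit
-- string, and B's Horner loop folds the same digits onto its accumulator
theorem pvMain (cs : List Char) (n : Int) :
    ∀ (w : List Char) (pos : Int) (pre : Char) (ter : String) (idx : Int),
      0 ≤ pos → pos + (w.length : Int) = n → n ≤ (cs.length : Int) →
      w = (cs.drop pos.toNat).take (n - pos).toNat →
      pre ∈ (['A','C','G','T'] : List Char) →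
      (∀ c ∈ w, c ∈ (['A','C','G','T'] : List Char)) →
      List.IsChain (· ≠ ·) (pre :: w) →
      ∃ ds : List Int,
        ds.length = w.length ∧ (∀ x ∈ ds, 0 ≤ x ∧ x < 3) ∧
        (∃ r : String, pvALoop cs n pos pre ter = some r ∧
            r.toList = ter.toList ++ ds.map pvDChar) ∧
        pvBLoop cs (PySem.List.pyRange pos n 1) idx pre
          = some (ds.foldl (fun a d => a * 3 + d) idx) := by
  intro w
  induction w with
  | nil =>
    intro pos pre ter idx h0 hlen hn hw hpre hmem hch
    have hpn : pos = n := by simpa using hlen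
    refine ⟨[], rfl, by simp, ⟨ter, ?_, by simp⟩, ?_⟩
    · rw [pvALoop, if_neg (by omega)]
    · rw [PySem.List.pyRange_one_eq_nil (by omega)]; rfl
  | cons c w' ih =>
    intro pos pre ter idx h0 hlen hn hw hpre hmem hch
    have hposn : pos < n := by simp at hlen; omega
    have hpos' : pos.toNat < cs.length := by omega
    have hdrop : cs.drop pos.toNat = cs[pos.toNat] :: cs.drop (pos.toNat + 1) :=
      List.drop_eq_getElem_cons hpos'
    have htk : (n - pos).toNat = w'.length + 1 := by simp at hlen ⊢; omega
    rw [hdrop, htk, List.take_succ_cons] at hw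
    obtain ⟨hc, hw'⟩ : c = cs[pos.toNat] ∧ w' = (cs.drop (pos.toNat + 1)).take w'.length := by
      constructor <;> [exact (List.cons.injEq _ _ _ _ ▸ hw).1; exact (List.cons.injEq _ _ _ _ ▸ hw).2]
    have hget : PySem.List.pyGet? cs pos = some c := by
      have hpn : pos = ((pos.toNat : Nat) : Int) := by omega
      rw [hpn, PySem.List.pyGet?_natCast, List.getElem?_eq_getElem hpos', hc]
    obtain ⟨hne, hch'⟩ := List.isChain_cons_cons.1 hch
    have hcl : c ∈ (['A','C','G','T'] : List Char) := hmem c (by simp)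
    obtain ⟨hsome, hlt3⟩ := pvDigit?_good pre hpre c hcl hne
    obtain ⟨d, hd⟩ := Option.isSome_iff_exists.1 hsome
    have hd3 : d < 3 := by rw [hd] at hlt3; simpa using hlt3
    have ihres := ih (pos + 1) c (ter ++ PySem.Int.toStr (d : Int)) (idx * 3 + (d : Int))
      (by omega) (by simp at hlen ⊢; omega) hn
      (by rw [hw']; congr 1 <;> [skip; simp at hlen ⊢] <;> omega)
      hcl (fun x hx => hmem x (by simp [hx])) hch'
    obtain ⟨ds, hdslen, hbnd, ⟨r, hA, hr⟩, hB⟩ := ihres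
    refine ⟨(d : Int) :: ds, by simp [hdslen], ?_, ⟨r, ?_, ?_⟩, ?_⟩
    · intro x hx
      rcases List.mem_cons.1 hx with h | h
      · subst h; constructor <;> [positivity; exact_mod_cast hd3]
      · exact hbnd x h
    · rw [pvALoop, if_pos hposn]
      simp only [hget, hd]
      exact hA
    · rw [hr]
      simp [pvToStr d hd3]
    · rw [PySem.List.pyRange_one_cons hposn]
      unfold pvBLoop
      simp only [hget, hd]
      exact hB

-- ===== VERDICT (by name: the statement is the Claim_ definition above) =====
theorem decode_index_spec : Claim_equal_decode_index := by
  intro s n _dom hpre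
  obtain ⟨h1, h2, h3⟩ := hpre
  have h2' : ∀ c ∈ s.toList.take n.toNat, c ∈ (['A','C','G','T'] : List Char) := by
    intro c hc
    have h := List.all_eq_true.1 h2 c hc
    simp only [Bool.or_eq_true, beq_iff_eq] at h
    simp only [List.mem_cons]
    tauto
  unfold Spec_decode_index decode_index decode_index_alt
  by_cases hn : n ≤ 0
  · rw [pvALoop, if_neg (by omega), PySem.List.pyRange_one_eq_nil (by omega)]
    simp [pvBLoop]
  · have htk : (s.toList.take n.toNat).length = n.toNat := by
      rw [List.length_take]; omega
    obtain ⟨ds, hdslen, hbnd, ⟨r, hA, hr⟩, hB⟩ :=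
      pvMain s.toList n (s.toList.take n.toNat) 0 'A' "" 0
        le_rfl (by rw [htk]; omega) h1 (by simp) (by decide) h2' h3
    rw [hA, hB]
    simp only [Option.getD_some]
    have hds : ds.length = n.toNat := by rw [hdslen, htk]
    have hmap : r.toList.map (fun ch => ((ch.toNat : Int) - 48)) = ds := by
      rw [hr]
      simp only [String.toList_empty, List.nil_append, List.map_map]
      calc ds.map ((fun ch => ((ch.toNat : Int) - 48)) ∘ pvDChar)
          = ds.map id := List.map_congr_left (fun x hx => pvDChar_val x (hbnd x hx).1 (hbnd x hx).2)
        _ = ds := List.map_id ds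
    rw [hmap]
    have hn' : n = (ds.length : Int) := by rw [hds]; omega
    rw [hn']
    have hps := pvPowSum ds ds.length 0 0 (by omega) (by omega)
    simpa using hps
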